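-- pv_equiv track=rewrite | github.com/nishio/atcoder | abc182/e.py | solve
-- ===== SOURCE A (Python) =====
-- def solve(H, W, mapdata):
--     maph = mapdata[:]
--     for y in range(H):
--         ypos = y * W
--         for x in range(1, W):
--             pos = ypos + x
--             if maph[pos] == 0 and maph[pos - 1] == 1:
--                 maph[pos] = 1
--
--         for x in range(W - 2, -1, -1):
--             pos = ypos + x
--             if maph[pos] == 0 and maph[pos + 1] == 1:
--                 maph[pos] = 1
--
--     mapv = mapdata[:]
--     for x in range(W):
--         for y in range(1, H):
--             pos = y * W + x
--             if mapv[pos] == 0 and mapv[pos - W] == 1: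
--                 mapv[pos] = 1
--
--         for y in range(H - 2, -1, -1):
--             pos = y * W + x
--             if mapv[pos] == 0 and mapv[pos + W] == 1:
--                 mapv[pos] = 1
--
--     ret = 0
--     for i in range(W * H):
--         if maph[i] == 1 or mapv[i] == 1:
--             ret += 1
--     return ret
-- ===== SOURCE B (Python) =====
-- def segment_lit(cells):
--     # True at each non-wall cell whose maximal wall-free run contains a light (1).
--     n = len(cells)
--     res = [False] * n
--     i = 0
--     while i < n:
--         if cells[i] != 0 and cells[i] != 1:
--             i += 1
--         else:
--             j = i
--             has = False
--             while j < n and (cells[j] == 0 or cells[j] == 1):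
--                 if cells[j] == 1:
--                     has = True
--                 j += 1
--             if has:
--                 for k in range(i, j):
--                     res[k] = True
--             i = j
--     return res
--
--
-- def solve(H, W, mapdata):
--     if H <= 0 or W <= 0:
--         return 0
--     rows = [mapdata[y * W:(y + 1) * W] for y in range(H)]
--     cols = [[rows[y][x] for y in range(H)] for x in range(W)]
--     lith = [segment_lit(r) for r in rows]
--     litv = [segment_lit(c) for c in cols]
--     ret = 0
--     for y in range(H):
--         for x in range(W):
--             if lith[y][x] or litv[x][y]:
--                 ret += 1
--     return ret
-- ===== Notes on version B (the rewrite author's own statement) =====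
-- stated objective: alternative
-- what changed: A propagates light in place with four directional neighbour-to-neighbour sweeps over the flat grid; B instead slices each row and each column into maximal wall-free runs and lights a whole run iff it contains a light, keeping horizontal and vertical lit tables separate and counting cells lit either way.
-- outside the precondition, e.g. on solve(-2, -2, [1, 1, 1, 1]): A returns 4, B returns 0
import Mathlib
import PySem

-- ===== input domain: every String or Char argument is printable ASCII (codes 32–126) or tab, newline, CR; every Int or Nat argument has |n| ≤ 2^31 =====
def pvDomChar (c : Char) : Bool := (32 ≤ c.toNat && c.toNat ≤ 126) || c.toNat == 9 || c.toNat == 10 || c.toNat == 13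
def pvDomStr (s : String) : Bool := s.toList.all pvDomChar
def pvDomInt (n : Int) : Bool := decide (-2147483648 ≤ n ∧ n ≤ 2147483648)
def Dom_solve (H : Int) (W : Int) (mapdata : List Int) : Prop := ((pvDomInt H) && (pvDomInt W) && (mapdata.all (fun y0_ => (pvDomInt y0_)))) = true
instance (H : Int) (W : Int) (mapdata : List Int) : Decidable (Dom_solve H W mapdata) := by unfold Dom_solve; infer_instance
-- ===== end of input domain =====

-- B replaces A's four in-place neighbour-propagation sweeps over the flat grid by an independent
-- per-row / per-column scan into maximal wall-free runs, lighting a whole run iff it contains a 1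
-- (objective: alternative decomposition, same asymptotic cost).

-- ===== PORT A =====
def solve (H : Int) (W : Int) (mapdata : List Int) : Int :=
  let maph := (PySem.List.pyRange 0 H 1).foldl (fun m y =>
      let ypos := y * W
      let m1 := (PySem.List.pyRange 1 W 1).foldl (fun m x =>
          let pos := ypos + x
          if PySem.List.pyGetD m pos 0 = 0 ∧ PySem.List.pyGetD m (pos - 1) 0 = 1
          then PySem.List.pySetD m pos 1 else m) m
      (PySem.List.pyRange (W - 2) (-1) (-1)).foldl (fun m x =>
          let pos := ypos + x
          if PySem.List.pyGetD m pos 0 = 0 ∧ PySem.List.pyGetD m (pos + 1) 0 = 1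
          then PySem.List.pySetD m pos 1 else m) m1) mapdata
  let mapv := (PySem.List.pyRange 0 W 1).foldl (fun m x =>
      let m1 := (PySem.List.pyRange 1 H 1).foldl (fun m y =>
          let pos := y * W + x
          if PySem.List.pyGetD m pos 0 = 0 ∧ PySem.List.pyGetD m (pos - W) 0 = 1
          then PySem.List.pySetD m pos 1 else m) m
      (PySem.List.pyRange (H - 2) (-1) (-1)).foldl (fun m y =>
          let pos := y * W + x
          if PySem.List.pyGetD m pos 0 = 0 ∧ PySem.List.pyGetD m (pos + W) 0 = 1
          then PySem.List.pySetD m pos 1 else m) m1) mapdata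
  (PySem.List.pyRange 0 (W * H) 1).foldl (fun ret i =>
      if PySem.List.pyGetD maph i 0 = 1 ∨ PySem.List.pyGetD mapv i 0 = 1 then ret + 1 else ret) 0

-- ===== PORT B =====
-- segment_lit from Source B: the index-based while loops become structural recursion via
-- takeWhile/dropWhile over the same segments.
def segLit (cells : List Int) : List Bool :=
  match cells with
  | [] => []
  | a :: t =>
    if a ≠ 0 ∧ a ≠ 1 then false :: segLit t
    else
      let seg := (a :: t).takeWhile (fun v => v == 0 || v == 1)
      let rest := (a :: t).dropWhile (fun v => v == 0 || v == 1)
      List.replicate seg.length (seg.contains 1) ++ segLit rest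
termination_by cells.length
decreasing_by
  all_goals first
  | (simp only [List.length_cons]; omega)
  | (have hp : (a == 0 || a == 1) = true := by
       by_cases h0 : a = 0 <;> by_cases h1 : a = 1 <;> simp_all
     simp only [List.dropWhile, hp]
     have := List.length_dropWhile_le (p := fun v : Int => v == 0 || v == 1) (l := t)
     simp only [List.length_cons]; omega)

def solve_alt (H : Int) (W : Int) (mapdata : List Int) : Int :=
  if H ≤ 0 ∨ W ≤ 0 then 0
  else
    let rows := (PySem.List.pyRange 0 H 1).map
        (fun y => PySem.List.slice mapdata (some (y * W)) (some ((y + 1) * W)))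
    let cols := (PySem.List.pyRange 0 W 1).map
        (fun x => (PySem.List.pyRange 0 H 1).map
            (fun y => PySem.List.pyGetD (PySem.List.pyGetD rows y []) x 0))
    let lith := rows.map segLit
    let litv := cols.map segLit
    (PySem.List.pyRange 0 H 1).foldl (fun ret y =>
      (PySem.List.pyRange 0 W 1).foldl (fun ret x =>
        if (PySem.List.pyGetD (PySem.List.pyGetD lith y []) x false
            || PySem.List.pyGetD (PySem.List.pyGetD litv x []) y false) = true
        then ret + 1 else ret) ret) 0

-- ===== PRECONDITION & SPEC =====
-- Pre_ excludes doubly-negative dimensions (H < 0 and W < 0, where A happens to count lights in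
-- the first H*W cells of an ill-formed grid while B reports an empty grid) and lists shorter than
-- H*W cells, on which A raises IndexError.
def Pre_solve (H : Int) (W : Int) (mapdata : List Int) : Prop :=
  (0 ≤ H ∧ 0 ≤ W ∧ H * W ≤ (mapdata.length : Int)) ∨ H * W ≤ 0
instance (H : Int) (W : Int) (mapdata : List Int) : Decidable (Pre_solve H W mapdata) := by
  unfold Pre_solve; infer_instance

def pvWitness_solve : Int × Int × List Int := (2, 3, [1, 0, 5, 0, 0, 1])

def Spec_solve (H : Int) (W : Int) (mapdata : List Int) (out : Int) : Prop := out = solve_alt H W mapdata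
instance (H : Int) (W : Int) (mapdata : List Int) (out : Int) : Decidable (Spec_solve H W mapdata out) := by unfold Spec_solve; infer_instance

-- ===== CLAIM (what is proved, stated in full; the proofs are below) =====
def Claim_equal_solve : Prop := ∀ (H : Int) (W : Int) (mapdata : List Int), Dom_solve H W mapdata → Pre_solve H W mapdata → Spec_solve H W mapdata (solve H W mapdata)

-- ===== LEMMAS AND PROOFS =====


-- Proof-side machinery: a carry-based description of A's two in-place sweeps over one line
-- (a row or a column), and an extraction of a strided line out of the flat grid.

def fwdB (b : Bool) : List Int → List Int
  | [] => []
  | a :: t =>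
    let a' := if a = 0 ∧ b = true then 1 else a
    a' :: fwdB (a' == 1) t

def bwdC (r : Int) : List Int → List Int
  | [] => []
  | a :: t =>
    let t' := bwdC r t
    (if a = 0 ∧ t'.headD r = 1 then 1 else a) :: t'

def sweep (l : List Int) : List Int := bwdC 0 (fwdB false l)

def extC (m : List Int) (β σ N : Nat) : List Int :=
  (List.range N).map (fun t => m.getD (β + t * σ) 0)

@[simp] theorem length_fwdB (b : Bool) (l : List Int) : (fwdB b l).length = l.length := by
  induction l generalizing b with
  | nil => rfl
  | cons a t ih => simp [fwdB, ih]

@[simp] theorem length_bwdC (r : Int) (l : List Int) : (bwdC r l).length = l.length := by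
  induction l with
  | nil => rfl
  | cons a t ih => simp [bwdC, ih]

@[simp] theorem length_sweep (l : List Int) : (sweep l).length = l.length := by
  simp [sweep]

@[simp] theorem length_extC (m : List Int) (β σ N : Nat) : (extC m β σ N).length = N := by
  simp [extC]

theorem extC_getD (m : List Int) (β σ N t : Nat) (ht : t < N) :
    (extC m β σ N).getD t 0 = m.getD (β + t * σ) 0 := by
  unfold extC
  rw [List.getD_eq_getElem?_getD, List.getElem?_map]
  simp [List.getElem?_range ht]

theorem extC_eq_of_getD (m : List Int) (β σ N : Nat) (l : List Int) (hl : l.length = N)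
    (h : ∀ t < N, m.getD (β + t * σ) 0 = l.getD t 0) : extC m β σ N = l := by
  apply List.ext_getElem (by simp [hl])
  intro t h1 h2
  have ht : t < N := by simpa using h1
  have := h t ht
  rw [← extC_getD m β σ N t ht] at this
  rw [List.getD_eq_getElem?_getD, List.getElem?_eq_getElem h1] at this
  rw [List.getD_eq_getElem?_getD, List.getElem?_eq_getElem h2] at this
  simpa using this

theorem fwd_head (l : List Int) : (fwdB false l).getD 0 0 = l.getD 0 0 := by
  cases l with
  | nil => rfl
  | cons a t => simp [fwdB]

theorem fwd_step (l : List Int) (b : Bool) (x : Nat) (hx : x + 1 < l.length) :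
    (fwdB b l).getD (x + 1) 0 =
      (if l.getD (x + 1) 0 = 0 ∧ (fwdB b l).getD x 0 = 1 then 1 else l.getD (x + 1) 0) := by
  induction l generalizing b x with
  | nil => simp at hx
  | cons a t ih =>
    cases x with
    | zero =>
      cases t with
      | nil => simp at hx
      | cons u t2 =>
        by_cases hu : u = 0 <;> by_cases ha : (if a = 0 ∧ b = true then 1 else a) = 1 <;>
          simp [fwdB, hu, ha]
    | succ x =>
      have := ih ((if a = 0 ∧ b = true then 1 else a) == 1) x (by simp at hx; omega)
      simpa [fwdB] using this

theorem bwd_step (r : Int) (l : List Int) (x : Nat) (hx : x + 1 < l.length) :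
    (bwdC r l).getD x 0 =
      (if l.getD x 0 = 0 ∧ (bwdC r l).getD (x + 1) 0 = 1 then 1 else l.getD x 0) := by
  induction l generalizing x with
  | nil => simp at hx
  | cons a t ih =>
    cases x with
    | zero =>
      have ht : t ≠ [] := by intro h; subst h; simp at hx
      have hne : bwdC r t ≠ [] := by
        intro h
        have := length_bwdC r t
        rw [h] at this
        exact ht (List.eq_nil_of_length_eq_zero this.symm)
      obtain ⟨v, t', hvt⟩ := List.exists_cons_of_ne_nil hne
      simp [bwdC, hvt]
    | succ x =>
      have := ih x (by simp at hx; omega)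
      simpa [bwdC] using this

theorem bwd_last (l : List Int) (hl : l ≠ []) :
    (bwdC 0 l).getD (l.length - 1) 0 = l.getD (l.length - 1) 0 := by
  induction l with
  | nil => simp at hl
  | cons a t ih =>
    cases t with
    | nil => simp [bwdC]
    | cons u t2 =>
      have := ih (by simp)
      simpa [bwdC] using this


theorem posInj (β σ t t' : Nat) (hσ : 1 ≤ σ) (h : β + t * σ = β + t' * σ) : t = t' := by
  have : t * σ = t' * σ := by omega
  exact Nat.eq_of_mul_eq_mul_right (by omega) this

theorem gridInj (w y y' x x' : Nat) (hx : x < w) (hx' : x' < w) (h : y * w + x = y' * w + x') :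
    y = y' ∧ x = x' := by
  have h1 : (y * w + x) % w = x := by
    rw [Nat.add_comm, Nat.add_mul_mod_self_right]
    exact Nat.mod_eq_of_lt hx
  have h2 : (y' * w + x') % w = x' := by
    rw [Nat.add_comm, Nat.add_mul_mod_self_right]
    exact Nat.mod_eq_of_lt hx'
  have hx12 : x = x' := by rw [← h1, ← h2, h]
  constructor
  · have : y * w = y' * w := by omega
    exact Nat.eq_of_mul_eq_mul_right (by omega) this
  · exact hx12

theorem getD_set_ne (l : List Int) (n j : Nat) (v : Int) (h : j ≠ n) :
    (l.set n v).getD j 0 = l.getD j 0 := by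
  simp [List.getD, List.getElem?_set_ne (id (Ne.symm h))]

theorem getD_set_self (l : List Int) (n : Nat) (v : Int) (h : n < l.length) :
    (l.set n v).getD n 0 = v := by
  simp [List.getD, h]

-- The forward in-place sweep of A along one strided line, as a foldl over the remaining index
-- range, computes fwdB on the extracted line and leaves everything else unchanged.
theorem fwd_loop (m : List Int) (β σ N : Nat) (p : Int → Int) (δ : Int)
    (hσ : 1 ≤ σ) (hδ : δ = (σ : Int))
    (hp : ∀ t : Nat, t ≤ N → p (t : Int) = ((β + t * σ : Nat) : Int))
    (hlen : ∀ t, t < N → β + t * σ < m.length) :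
    ∀ (d k : Nat), k + d = N → 1 ≤ k →
    ∀ (s : List Int), s.length = m.length →
    (∀ t, t < k → s.getD (β + t * σ) 0 = (fwdB false (extC m β σ N)).getD t 0) →
    (∀ j, j < m.length → (∀ t, t < N → j ≠ β + t * σ) → s.getD j 0 = m.getD j 0) →
    (∀ t, k ≤ t → t < N → s.getD (β + t * σ) 0 = m.getD (β + t * σ) 0) →
    (let R := (PySem.List.pyRange (k : Int) (N : Int) 1).foldl
        (fun s x => if PySem.List.pyGetD s (p x) 0 = 0 ∧ PySem.List.pyGetD s (p x - δ) 0 = 1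
                    then PySem.List.pySetD s (p x) 1 else s) s
     R.length = m.length ∧
     (∀ t, t < N → R.getD (β + t * σ) 0 = (fwdB false (extC m β σ N)).getD t 0) ∧
     (∀ j, j < m.length → (∀ t, t < N → j ≠ β + t * σ) → R.getD j 0 = m.getD j 0)) := by
  intro d
  induction d with
  | zero =>
    intro k hk hk1 s hslen hdone hout hrest
    have hkN : k = N := by omega
    subst hkN
    rw [PySem.List.pyRange_one_eq_nil (by omega)]
    exact ⟨hslen, fun t ht => hdone t ht, hout⟩
  | succ d ih =>
    intro k hk hk1 s hslen hdone hout hrest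
    obtain ⟨k', rfl⟩ : ∃ k', k = k' + 1 := ⟨k - 1, by omega⟩
    have hkN : k' + 1 < N := by omega
    have hposlt : β + (k' + 1) * σ < m.length := hlen _ hkN
    rw [PySem.List.pyRange_one_cons (by exact_mod_cast hkN)]
    simp only [List.foldl_cons]
    have hppred : p ((k' + 1 : Nat) : Int) - δ = ((β + k' * σ : Nat) : Int) := by
      rw [hp _ (le_of_lt hkN), hδ]
      push_cast [Nat.succ_mul]
      ring
    have hstep : (if PySem.List.pyGetD s (p ((k' + 1 : Nat) : Int)) 0 = 0 ∧
            PySem.List.pyGetD s (p ((k' + 1 : Nat) : Int) - δ) 0 = 1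
        then PySem.List.pySetD s (p ((k' + 1 : Nat) : Int)) 1 else s)
        = if m.getD (β + (k' + 1) * σ) 0 = 0 ∧ (fwdB false (extC m β σ N)).getD k' 0 = 1
          then s.set (β + (k' + 1) * σ) 1 else s := by
      rw [hppred, hp _ (le_of_lt hkN)]
      rw [PySem.List.pyGetD_natCast, PySem.List.pyGetD_natCast, PySem.List.pySetD_natCast]
      rw [hrest _ (le_refl _) hkN, hdone k' (by omega)]
    rw [hstep]
    have hcast : ((k' + 1 : Nat) : Int) + 1 = ((k' + 2 : Nat) : Int) := by push_cast; ring
    rw [hcast]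
    set s' := if m.getD (β + (k' + 1) * σ) 0 = 0 ∧ (fwdB false (extC m β σ N)).getD k' 0 = 1
        then s.set (β + (k' + 1) * σ) 1 else s with hs'
    have hvalk : s'.getD (β + (k' + 1) * σ) 0 = (fwdB false (extC m β σ N)).getD (k' + 1) 0 := by
      have hfs := fwd_step (extC m β σ N) false k' (by simp; omega)
      rw [extC_getD m β σ N (k' + 1) hkN] at hfs
      rw [hs']
      by_cases hcond : m.getD (β + (k' + 1) * σ) 0 = 0 ∧ (fwdB false (extC m β σ N)).getD k' 0 = 1
      · rw [if_pos hcond, getD_set_self _ _ _ (by omega : β + (k' + 1) * σ < s.length),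
          hfs, if_pos hcond]
      · rw [if_neg hcond, hfs, if_neg hcond, hrest _ (le_refl _) hkN]
    have hs'len : s'.length = m.length := by
      rw [hs']; split <;> simp [hslen]
    have hs'ne : ∀ j, j ≠ β + (k' + 1) * σ → s'.getD j 0 = s.getD j 0 := by
      intro j hj
      rw [hs']; split
      · exact getD_set_ne _ _ _ _ hj
      · rfl
    refine ih (k' + 2) (by omega) (by omega) s' hs'len ?_ ?_ ?_
    · intro t ht
      by_cases htk : t = k' + 1
      · subst htk; exact hvalk
      · rw [hs'ne _ (fun hc => htk (posInj β σ t (k' + 1) hσ hc))]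
        exact hdone t (by omega)
    · intro j hj hjt
      rw [hs'ne _ (hjt (k' + 1) hkN)]
      exact hout j hj hjt
    · intro t ht1 ht2
      have : t ≠ k' + 1 := by omega
      rw [hs'ne _ (fun hc => this (posInj β σ t (k' + 1) hσ hc))]
      exact hrest t (by omega) ht2


-- The backward in-place sweep of A along one strided line: folding the countdown range
-- pyRange (k-1) (-1) (-1) over a state whose indices ≥ k already hold bwdC values.
theorem bwd_loop (m : List Int) (β σ N : Nat) (p : Int → Int) (δ : Int)
    (hσ : 1 ≤ σ) (hδ : δ = (σ : Int))
    (hp : ∀ t : Nat, t ≤ N → p (t : Int) = ((β + t * σ : Nat) : Int))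
    (hlen : ∀ t, t < N → β + t * σ < m.length) :
    ∀ (k : Nat), k < N →
    ∀ (s : List Int), s.length = m.length →
    (∀ t, t < k → s.getD (β + t * σ) 0 = (extC m β σ N).getD t 0) →
    (∀ t, k ≤ t → t < N → s.getD (β + t * σ) 0 = (bwdC 0 (extC m β σ N)).getD t 0) →
    (∀ j, j < m.length → (∀ t, t < N → j ≠ β + t * σ) → s.getD j 0 = m.getD j 0) →
    (let R := (PySem.List.pyRange ((k : Int) - 1) (-1) (-1)).foldl
        (fun s x => if PySem.List.pyGetD s (p x) 0 = 0 ∧ PySem.List.pyGetD s (p x + δ) 0 = 1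
                    then PySem.List.pySetD s (p x) 1 else s) s
     R.length = m.length ∧
     (∀ t, t < N → R.getD (β + t * σ) 0 = (bwdC 0 (extC m β σ N)).getD t 0) ∧
     (∀ j, j < m.length → (∀ t, t < N → j ≠ β + t * σ) → R.getD j 0 = m.getD j 0)) := by
  intro k
  induction k with
  | zero =>
    intro hkN s hslen hpending hdone hout
    rw [PySem.List.pyRange_neg_one_eq_nil (by omega)]
    exact ⟨hslen, fun t ht => hdone t (by omega) ht, hout⟩
  | succ k ih =>
    intro hkN s hslen hpending hdone hout
    have hklt : k < N := by omega
    have hposlt : β + k * σ < m.length := hlen _ hklt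
    have hcast : ((k + 1 : Nat) : Int) - 1 = ((k : Nat) : Int) := by push_cast; ring
    rw [hcast, PySem.List.pyRange_neg_one_cons (by omega)]
    simp only [List.foldl_cons]
    have hpsucc : p ((k : Nat) : Int) + δ = ((β + (k + 1) * σ : Nat) : Int) := by
      rw [hp _ (by omega), hδ]
      push_cast [Nat.succ_mul]
      ring
    have hstep : (if PySem.List.pyGetD s (p ((k : Nat) : Int)) 0 = 0 ∧
            PySem.List.pyGetD s (p ((k : Nat) : Int) + δ) 0 = 1
        then PySem.List.pySetD s (p ((k : Nat) : Int)) 1 else s)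
        = if (extC m β σ N).getD k 0 = 0 ∧ (bwdC 0 (extC m β σ N)).getD (k + 1) 0 = 1
          then s.set (β + k * σ) 1 else s := by
      rw [hpsucc, hp _ (by omega)]
      rw [PySem.List.pyGetD_natCast, PySem.List.pyGetD_natCast, PySem.List.pySetD_natCast]
      rw [hpending k (by omega), hdone (k + 1) (by omega) (by omega)]
    rw [hstep]
    set s' := if (extC m β σ N).getD k 0 = 0 ∧ (bwdC 0 (extC m β σ N)).getD (k + 1) 0 = 1
        then s.set (β + k * σ) 1 else s with hs'
    have hvalk : s'.getD (β + k * σ) 0 = (bwdC 0 (extC m β σ N)).getD k 0 := by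
      have hbs := bwd_step 0 (extC m β σ N) k (by simp; omega)
      rw [hs']
      by_cases hcond : (extC m β σ N).getD k 0 = 0 ∧ (bwdC 0 (extC m β σ N)).getD (k + 1) 0 = 1
      · rw [if_pos hcond, getD_set_self _ _ _ (by omega : β + k * σ < s.length), hbs, if_pos hcond]
      · rw [if_neg hcond, hbs, if_neg hcond, hpending k (by omega)]
    have hs'len : s'.length = m.length := by
      rw [hs']; split <;> simp [hslen]
    have hs'ne : ∀ j, j ≠ β + k * σ → s'.getD j 0 = s.getD j 0 := by
      intro j hj
      rw [hs']; split
      · exact getD_set_ne _ _ _ _ hj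
      · rfl
    refine ih hklt s' hs'len ?_ ?_ ?_
    · intro t ht
      have : t ≠ k := by omega
      rw [hs'ne _ (fun hc => this (posInj β σ t k hσ hc))]
      exact hpending t (by omega)
    · intro t ht1 ht2
      by_cases htk : t = k
      · subst htk; exact hvalk
      · rw [hs'ne _ (fun hc => htk (posInj β σ t k hσ hc))]
        exact hdone t (by omega) ht2
    · intro j hj hjt
      rw [hs'ne _ (hjt k hklt)]
      exact hout j hj hjt


-- One full iteration of A's outer loops on a line: forward sweep then backward sweep
-- computes `sweep` of the extracted line in place.
theorem line_sweep (s : List Int) (β σ N : Nat) (p : Int → Int) (δ : Int)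
    (hσ : 1 ≤ σ) (hδ : δ = (σ : Int))
    (hp : ∀ t : Nat, t ≤ N → p (t : Int) = ((β + t * σ : Nat) : Int))
    (hlen : ∀ t, t < N → β + t * σ < s.length) :
    (let F := (PySem.List.pyRange 1 (N : Int) 1).foldl
        (fun s x => if PySem.List.pyGetD s (p x) 0 = 0 ∧ PySem.List.pyGetD s (p x - δ) 0 = 1
                    then PySem.List.pySetD s (p x) 1 else s) s
     let R := (PySem.List.pyRange ((N : Int) - 2) (-1) (-1)).foldl
        (fun s x => if PySem.List.pyGetD s (p x) 0 = 0 ∧ PySem.List.pyGetD s (p x + δ) 0 = 1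
                    then PySem.List.pySetD s (p x) 1 else s) F
     R.length = s.length ∧
     (∀ t, t < N → R.getD (β + t * σ) 0 = (sweep (extC s β σ N)).getD t 0) ∧
     (∀ j, j < s.length → (∀ t, t < N → j ≠ β + t * σ) → R.getD j 0 = s.getD j 0)) := by
  by_cases hN : N = 0
  · subst hN
    rw [PySem.List.pyRange_one_eq_nil (by simp), PySem.List.pyRange_neg_one_eq_nil (by omega)]
    exact ⟨rfl, fun t ht => absurd ht (by omega), fun j _ _ => rfl⟩
  · have hN1 : 1 ≤ N := by omega
    have hF := fwd_loop s β σ N p δ hσ hδ hp hlen (N - 1) 1 (by omega) (le_refl 1) s rfl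
      (by
        intro t ht
        have ht0 : t = 0 := by omega
        subst ht0
        rw [fwd_head, extC_getD s β σ N 0 (by omega)])
      (fun j _ _ => rfl) (fun t _ _ => rfl)
    simp only [Nat.cast_one] at hF
    set F := (PySem.List.pyRange (1 : Int) (N : Int) 1).foldl
        (fun s x => if PySem.List.pyGetD s (p x) 0 = 0 ∧ PySem.List.pyGetD s (p x - δ) 0 = 1
                    then PySem.List.pySetD s (p x) 1 else s) s with hFdef
    obtain ⟨hFlen, hFpos, hFout⟩ := hF
    have heF : extC F β σ N = fwdB false (extC s β σ N) := by
      apply extC_eq_of_getD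
      · simp
      · intro t ht
        exact hFpos t ht
    have hlenF : ∀ t, t < N → β + t * σ < F.length := by
      intro t ht; rw [hFlen]; exact hlen t ht
    have hcast2 : ((N - 1 : Nat) : Int) - 1 = (N : Int) - 2 := by
      have : (1:Nat) ≤ N := hN1
      push_cast [this]
      ring
    have hB := bwd_loop F β σ N p δ hσ hδ hp hlenF (N - 1) (by omega) F rfl
      (by
        intro t ht
        rw [heF]
        exact hFpos t (by omega))
      (by
        intro t ht1 ht2
        have ht : t = N - 1 := by omega
        subst ht
        rw [heF, hFpos (N - 1) (by omega)]
        have hlast := bwd_last (fwdB false (extC s β σ N)) (by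
          intro hc
          have := congrArg List.length hc
          simp at this
          omega)
        simp only [length_fwdB, length_extC] at hlast
        exact hlast.symm)
      (fun j hj hjt => rfl)
    rw [hcast2] at hB
    obtain ⟨hBlen, hBpos, hBout⟩ := hB
    refine ⟨by rw [hBlen, hFlen], ?_, ?_⟩
    · intro t ht
      rw [hBpos t ht, heF]
      rfl
    · intro j hj hjt
      rw [hBout j (by rw [hFlen]; exact hj) hjt]
      exact hFout j hj hjt

theorem rowPosLt (w y k x : Nat) (hy : y < k) (hx : x < w) : y * w + x < k * w := by
  calc y * w + x < y * w + w := by omega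
    _ = (y + 1) * w := by ring
    _ ≤ k * w := Nat.mul_le_mul_right w hy

-- A's horizontal phase: every cell (y,x) of the result holds sweep(row y) at x.
theorem hphase (md : List Int) (h w : Nat) (hw1 : 1 ≤ w) (hlen : h * w ≤ md.length) :
    ∀ (d k : Nat), k + d = h → ∀ (s : List Int), s.length = md.length →
    (∀ y, y < k → ∀ x, x < w → s.getD (y * w + x) 0 = (sweep (extC md (y * w) 1 w)).getD x 0) →
    (∀ j, j < md.length → k * w ≤ j → s.getD j 0 = md.getD j 0) →
    (let R := (PySem.List.pyRange (k : Int) (h : Int) 1).foldl (fun m y =>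
        (PySem.List.pyRange ((w : Int) - 2) (-1) (-1)).foldl (fun m x =>
            if PySem.List.pyGetD m (y * (w : Int) + x) 0 = 0 ∧
                PySem.List.pyGetD m (y * (w : Int) + x + 1) 0 = 1
            then PySem.List.pySetD m (y * (w : Int) + x) 1 else m)
          ((PySem.List.pyRange 1 (w : Int) 1).foldl (fun m x =>
            if PySem.List.pyGetD m (y * (w : Int) + x) 0 = 0 ∧
                PySem.List.pyGetD m (y * (w : Int) + x - 1) 0 = 1
            then PySem.List.pySetD m (y * (w : Int) + x) 1 else m) m)) s
     R.length = md.length ∧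
     (∀ y, y < h → ∀ x, x < w → R.getD (y * w + x) 0 = (sweep (extC md (y * w) 1 w)).getD x 0)) := by
  intro d
  induction d with
  | zero =>
    intro k hk s hslen hdone hout
    have hkh : k = h := by omega
    subst hkh
    rw [PySem.List.pyRange_one_eq_nil (le_refl ((k : Nat) : Int))]
    exact ⟨hslen, hdone⟩
  | succ d ih =>
    intro k hk s hslen hdone hout
    have hkh : k < h := by omega
    rw [PySem.List.pyRange_one_cons (a := ((k : Nat) : Int)) (b := ((h : Nat) : Int))
      (by exact_mod_cast hkh)]
    simp only [List.foldl_cons]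
    have hrowlen : ∀ t, t < w → k * w + t * 1 < s.length := by
      intro t ht
      rw [hslen]
      have h1 : k * w + t * 1 < (k + 1) * w := by rw [Nat.mul_one, Nat.succ_mul]; omega
      have h2 : (k + 1) * w ≤ h * w := Nat.mul_le_mul_right w (by omega)
      omega
    have hline := line_sweep s (k * w) 1 w (fun x => ((k : Nat) : Int) * ((w : Nat) : Int) + x) 1
      (le_refl 1) (by simp)
      (by intro t htw; push_cast [Nat.mul_one]; ring)
      hrowlen
    beta_reduce at hline
    obtain ⟨hLlen, hLpos, hLout⟩ := hline
    have hext : extC s (k * w) 1 w = extC md (k * w) 1 w := by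
      apply extC_eq_of_getD
      · simp
      · intro t ht
        rw [hout _ (by have h1 := hrowlen t ht; rw [hslen] at h1; exact h1) (by omega)]
        rw [extC_getD md _ _ _ t ht]
    have hcast : ((k : Nat) : Int) + 1 = ((k + 1 : Nat) : Int) := by push_cast; ring
    rw [hcast]
    refine ih (k + 1) (by omega) _ (by rw [hLlen, hslen]) ?_ ?_
    · intro y hy x hx
      by_cases hyk : y = k
      · subst hyk
        have hv := hLpos x hx
        rw [Nat.mul_one] at hv
        rw [hv, hext]
      · have hy' : y < k := by omega
        have hposlt : y * w + x < s.length := by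
          rw [hslen]
          have h1 := rowPosLt w y k x hy' hx
          have h2 : k * w ≤ h * w := Nat.mul_le_mul_right w (le_of_lt hkh)
          omega
        have hpos : ∀ t, t < w → y * w + x ≠ k * w + t * 1 := by
          intro t ht hc
          rw [Nat.mul_one] at hc
          have := rowPosLt w y k x hy' hx
          omega
        rw [hLout _ hposlt hpos]
        exact hdone y hy' x hx
    · intro j hj hjge
      have hpos : ∀ t, t < w → j ≠ k * w + t * 1 := by
        intro t ht hc
        rw [Nat.mul_one] at hc
        have h1 : k * w + t < (k + 1) * w := by rw [Nat.succ_mul]; omega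
        omega
      rw [hLout j (by rw [hslen]; exact hj) hpos]
      refine hout j hj ?_
      have : k * w ≤ (k + 1) * w := Nat.mul_le_mul_right w (by omega)
      omega


-- A's vertical phase: every cell (y,x) of the result holds sweep(column x) at y.
theorem vphase (md : List Int) (h w : Nat) (hh1 : 1 ≤ h) (hw1 : 1 ≤ w)
    (hlen : h * w ≤ md.length) :
    ∀ (d k : Nat), k + d = w → k ≤ w → ∀ (s : List Int), s.length = md.length →
    (∀ x, x < k → ∀ y, y < h → s.getD (y * w + x) 0 = (sweep (extC md x w h)).getD y 0) →
    (∀ j, j < md.length → (∀ x, x < k → ∀ y, y < h → j ≠ y * w + x) → s.getD j 0 = md.getD j 0) →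
    (let R := (PySem.List.pyRange (k : Int) (w : Int) 1).foldl (fun m x =>
        (PySem.List.pyRange ((h : Int) - 2) (-1) (-1)).foldl (fun m y =>
            if PySem.List.pyGetD m (y * (w : Int) + x) 0 = 0 ∧
                PySem.List.pyGetD m (y * (w : Int) + x + (w : Int)) 0 = 1
            then PySem.List.pySetD m (y * (w : Int) + x) 1 else m)
          ((PySem.List.pyRange 1 (h : Int) 1).foldl (fun m y =>
            if PySem.List.pyGetD m (y * (w : Int) + x) 0 = 0 ∧
                PySem.List.pyGetD m (y * (w : Int) + x - (w : Int)) 0 = 1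
            then PySem.List.pySetD m (y * (w : Int) + x) 1 else m) m)) s
     R.length = md.length ∧
     (∀ x, x < w → ∀ y, y < h → R.getD (y * w + x) 0 = (sweep (extC md x w h)).getD y 0)) := by
  intro d
  induction d with
  | zero =>
    intro k hk hkw s hslen hdone hout
    have hkh : k = w := by omega
    subst hkh
    rw [PySem.List.pyRange_one_eq_nil (le_refl ((k : Nat) : Int))]
    exact ⟨hslen, hdone⟩
  | succ d ih =>
    intro k hk hkw s hslen hdone hout
    have hkh : k < w := by omega
    rw [PySem.List.pyRange_one_cons (a := ((k : Nat) : Int)) (b := ((w : Nat) : Int))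
      (by exact_mod_cast hkh)]
    simp only [List.foldl_cons]
    have hcollen : ∀ t, t < h → k + t * w < s.length := by
      intro t ht
      rw [hslen]
      have h1 : k + t * w < (t + 1) * w := by rw [Nat.succ_mul]; omega
      have h2 : (t + 1) * w ≤ h * w := Nat.mul_le_mul_right w (by omega)
      omega
    have hline := line_sweep s k w h (fun y => y * ((w : Nat) : Int) + ((k : Nat) : Int))
      ((w : Nat) : Int) hw1 rfl
      (by intro t hth; push_cast; ring)
      hcollen
    beta_reduce at hline
    obtain ⟨hLlen, hLpos, hLout⟩ := hline
    have hext : extC s k w h = extC md k w h := by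
      apply extC_eq_of_getD
      · simp
      · intro t ht
        rw [hout _ (by have h1 := hcollen t ht; rw [hslen] at h1; exact h1) ?_]
        · rw [extC_getD md _ _ _ t ht]
        · intro x hx y hy hc
          have := gridInj w y t x k (by omega) hkh (by omega)
          omega
    have hcast : ((k : Nat) : Int) + 1 = ((k + 1 : Nat) : Int) := by push_cast; ring
    rw [hcast]
    refine ih (k + 1) (by omega) (by omega) _ (by rw [hLlen, hslen]) ?_ ?_
    · intro x hx y hy
      by_cases hxk : x = k
      · subst hxk
        have hv := hLpos y hy
        have hvpos : x + y * w = y * w + x := by omega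
        rw [Nat.add_comm x (y * w)] at hv
        rw [hv, hext]
      · have hx' : x < k := by omega
        have hposlt : y * w + x < s.length := by
          rw [hslen]
          have h1 : y * w + x < (y + 1) * w := by rw [Nat.succ_mul]; omega
          have h2 : (y + 1) * w ≤ h * w := Nat.mul_le_mul_right w (by omega)
          omega
        have hpos : ∀ t, t < h → y * w + x ≠ k + t * w := by
          intro t ht hc
          have := gridInj w y t x k (by omega) hkh (by omega)
          omega
        rw [hLout _ hposlt hpos]
        exact hdone x hx' y hy
    · intro j hj hjt
      have hpos : ∀ t, t < h → j ≠ k + t * w := by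
        intro t ht hc
        exact hjt k (by omega) t ht (by omega)
      rw [hLout j (by rw [hslen]; exact hj) hpos]
      refine hout j hj ?_
      intro x hx y hy
      exact hjt x (by omega) y hy


-- Carry of the forward sweep after a prefix.
def fcarry (b : Bool) : List Int → Bool
  | [] => b
  | a :: t => fcarry ((if a = 0 ∧ b = true then 1 else a) == 1) t

theorem fwdB_append (b : Bool) (u v : List Int) :
    fwdB b (u ++ v) = fwdB b u ++ fwdB (fcarry b u) v := by
  induction u generalizing b with
  | nil => rfl
  | cons a t ih => simp [fwdB, fcarry, ih]

theorem fwdB_congr_head (b b' : Bool) (l : List Int) (h : ∀ a, l.head? = some a → a ≠ 0) :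
    fwdB b l = fwdB b' l := by
  cases l with
  | nil => rfl
  | cons a t =>
    have ha : a ≠ 0 := h a rfl
    simp [fwdB, ha]

theorem head?_fwdB (b : Bool) (a : Int) (t : List Int) (ha : a ≠ 0) :
    (fwdB b (a :: t)).head? = some a := by
  simp [fwdB, ha]

theorem head?_bwdC (r : Int) (l : List Int) (h : ∀ a, l.head? = some a → a ≠ 0) :
    (bwdC r l).head? = l.head? := by
  cases l with
  | nil => rfl
  | cons a t =>
    have ha : a ≠ 0 := h a rfl
    simp [bwdC, ha]

theorem headD_append_left {α : Type} (u v : List α) (d d' : α) (hu : u ≠ []) :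
    (u ++ v).headD d = u.headD d' := by
  cases u with
  | nil => exact absurd rfl hu
  | cons a t => simp

theorem bwdC_append (r : Int) (u v : List Int) :
    bwdC r (u ++ v) = bwdC ((bwdC r v).headD r) u ++ bwdC r v := by
  induction u with
  | nil => rfl
  | cons a t ih =>
    simp only [List.cons_append, bwdC, ih]
    congr 2
    by_cases ht : t = []
    · subst ht
      simp [bwdC]
    · have hne : bwdC ((bwdC r v).headD r) t ≠ [] := by
        intro hc
        have := length_bwdC ((bwdC r v).headD r) t
        rw [hc] at this
        exact ht (List.eq_nil_of_length_eq_zero this.symm)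
      rw [headD_append_left _ _ r ((bwdC r v).headD r) hne]

def P01 (l : List Int) : Prop := ∀ v ∈ l, v = 0 ∨ v = 1

theorem fwdB_true_all01 (l : List Int) (h : P01 l) :
    fwdB true l = List.replicate l.length 1 := by
  induction l with
  | nil => rfl
  | cons a t ih =>
    have ha := h a (by simp)
    have ht : P01 t := fun v hv => h v (by simp [hv])
    rcases ha with ha | ha <;> subst ha <;>
      simp [fwdB, List.replicate_succ, ih ht]

theorem fwdB_false_all01 (l : List Int) (h : P01 l) :
    fwdB false l = l.takeWhile (fun v => v == 0) ++
      List.replicate (l.length - (l.takeWhile (fun v => v == 0)).length) 1 := by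
  induction l with
  | nil => rfl
  | cons a t ih =>
    have ha := h a (by simp)
    have ht : P01 t := fun v hv => h v (by simp [hv])
    rcases ha with ha | ha <;> subst ha
    · simp only [fwdB, List.takeWhile]
      norm_num
      rw [show ((0:Int) == 1) = false from rfl, ih ht]
      congr 2
      omega
    · simp only [fwdB, List.takeWhile]
      norm_num
      rw [fwdB_true_all01 t ht]
      simp [List.replicate_succ]

theorem takeWhile_zeros (l : List Int) :
    l.takeWhile (fun v => v == 0) =
      List.replicate (l.takeWhile (fun v => v == 0)).length 0 := by
  rw [List.eq_replicate_iff]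
  exact ⟨rfl, fun b hb => by simpa using List.mem_takeWhile_imp hb⟩

theorem bwdC_replicate_one (r : Int) (k : Nat) :
    bwdC r (List.replicate k 1) = List.replicate k 1 := by
  induction k with
  | zero => rfl
  | succ k ih => simp [List.replicate_succ, bwdC, ih]

theorem bwdC_zeros_ones (r : Int) (z k : Nat) (hk : 1 ≤ k) :
    bwdC r (List.replicate z 0 ++ List.replicate k 1) = List.replicate (z + k) 1 := by
  induction z with
  | zero => simpa using bwdC_replicate_one r k
  | succ z ih =>
    rw [List.replicate_succ, List.cons_append]
    simp only [bwdC, ih]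
    have hne : (List.replicate (z + k) (1 : Int)).headD r = 1 := by
      have : z + k ≠ 0 := by omega
      cases hzk : z + k with
      | zero => omega
      | succ n => simp [List.replicate_succ]
    rw [hne, if_pos (by norm_num)]
    rw [show z + 1 + k = (z + k) + 1 by omega, List.replicate_succ]

theorem bwdC_zeros (r : Int) (hr : r ≠ 1) (z : Nat) :
    bwdC r (List.replicate z 0) = List.replicate z 0 := by
  induction z with
  | zero => rfl
  | succ z ih =>
    rw [List.replicate_succ]
    simp only [bwdC, ih]
    cases hz : z with
    | zero => simp [hr]
    | succ n => simp [List.replicate_succ]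

-- The heart of the equivalence: B's per-segment lighting is exactly "value 1 after A's two sweeps".
theorem segLit_eq_sweep (l : List Int) :
    segLit l = (sweep l).map (fun v => v == 1) := by
  induction l using segLit.induct with
  | case1 => rw [segLit]; rfl
  | case2 a t hwall ih =>
    obtain ⟨ha0, ha1⟩ := hwall
    rw [segLit, if_pos ⟨ha0, ha1⟩]
    have hfwd : fwdB false (a :: t) = a :: fwdB false t := by
      simp only [fwdB]
      rw [if_neg (by simp), show ((a == 1) = false) by simp [ha1]]
    have hbwd : sweep (a :: t) = a :: sweep t := by
      rw [sweep, hfwd]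
      simp only [bwdC]
      rw [if_neg (by tauto)]
      rfl
    rw [hbwd, List.map_cons, ih]
    congr 1
    simp [ha1]
  | case3 a t hseg restv ih =>
    have hsplit : (a :: t).takeWhile (fun v : Int => v == 0 || v == 1) ++
        (a :: t).dropWhile (fun v : Int => v == 0 || v == 1) = a :: t :=
      List.takeWhile_append_dropWhile
    set seg := (a :: t).takeWhile (fun v : Int => v == 0 || v == 1) with hsegdef
    set rest := (a :: t).dropWhile (fun v : Int => v == 0 || v == 1) with hrestdef
    have hP01 : P01 seg := by
      intro v hv
      have := List.mem_takeWhile_imp hv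
      simp at this
      tauto
    have hrh : ∀ b, rest.head? = some b → b ≠ 0 ∧ b ≠ 1 := by
      intro b hb
      have h1 := List.head?_dropWhile_not (fun v : Int => v == 0 || v == 1) (a :: t)
      rw [← hrestdef, hb] at h1
      simp at h1
      tauto
    have hsegLit : segLit (a :: t) = List.replicate seg.length (seg.contains 1) ++ segLit rest := by
      rw [segLit, if_neg hseg]
    have hfwd : fwdB false (a :: t) = fwdB false seg ++ fwdB false rest := by
      conv_lhs => rw [← hsplit]
      rw [fwdB_append]
      congr 1
      apply fwdB_congr_head
      intro b hb
      exact (hrh b hb).1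
    set r := (bwdC 0 (fwdB false rest)).headD 0 with hrdef
    have hr1 : r ≠ 1 := by
      cases hr : rest with
      | nil =>
        rw [hrdef, hr]
        norm_num [fwdB, bwdC]
      | cons c cs =>
        have hc := hrh c (by rw [hr]; rfl)
        have h1 : (fwdB false rest).head? = some c := by
          rw [hr]; exact head?_fwdB false c cs hc.1
        have h2 : (bwdC 0 (fwdB false rest)).head? = some c := by
          rw [head?_bwdC _ _ (by intro b hb; rw [h1] at hb; cases hb; exact hc.1)]
          exact h1
        rw [hrdef, List.headD_eq_head?_getD, h2]
        exact hc.2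
    have hbwd : sweep (a :: t) = bwdC r (fwdB false seg) ++ sweep rest := by
      rw [sweep, hfwd, bwdC_append]
      rfl
    rw [hsegLit, hbwd, List.map_append, ih]
    congr 1
    by_cases hc1 : seg.contains 1 = true
    · have hfseg := fwdB_false_all01 seg hP01
      have htwlen : (seg.takeWhile (fun v : Int => v == 0)).length ≤ seg.length :=
        (List.takeWhile_prefix _).length_le
      have hlt : (seg.takeWhile (fun v : Int => v == 0)).length < seg.length := by
        rcases Nat.lt_or_ge (seg.takeWhile (fun v : Int => v == 0)).length seg.length with hl | hl
        · exact hl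
        · exfalso
          have heq : seg.takeWhile (fun v : Int => v == 0) = seg :=
            (List.takeWhile_prefix _).eq_of_length (by omega)
          have hall : ∀ v ∈ seg, v = 0 := by
            intro v hv
            rw [← heq] at hv
            simpa using List.mem_takeWhile_imp hv
          have h1m : (1 : Int) ∈ seg := by simpa using hc1
          have := hall 1 h1m
          norm_num at this
      rw [hc1, hfseg]
      conv_rhs => rw [takeWhile_zeros seg]
      simp only [List.length_replicate]
      rw [bwdC_zeros_ones r _ _ (by omega)]
      rw [show (seg.takeWhile (fun v : Int => v == 0)).length +
          (seg.length - (seg.takeWhile (fun v : Int => v == 0)).length) = seg.length by omega]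
      rw [List.map_replicate]
      rfl
    · have hall0 : ∀ v ∈ seg, v = 0 := by
        intro v hv
        rcases hP01 v hv with h0 | h1
        · exact h0
        · exfalso
          apply hc1
          subst h1
          simpa using hv
      have htwseg : seg.takeWhile (fun v : Int => v == 0) = seg := by
        rw [List.takeWhile_eq_self_iff]
        intro v hv
        simp [hall0 v hv]
      have hfseg : fwdB false seg = seg := by
        rw [fwdB_false_all01 seg hP01, htwseg]
        simp
      have hseg0 : seg = List.replicate seg.length 0 :=
        List.eq_replicate_iff.mpr ⟨rfl, hall0⟩
      rw [show (seg.contains 1) = false by simpa using hc1, hfseg]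
      conv_rhs => rw [hseg0]
      rw [bwdC_zeros r hr1, List.map_replicate]
      rfl


theorem count_grid (P : Nat → Prop) [DecidablePred P] (h w : Nat) :
    (List.range (h * w)).foldl (fun (r : Int) i => if P i then r + 1 else r) 0
    = (List.range h).foldl (fun (r : Int) y =>
        (List.range w).foldl (fun (r : Int) x => if P (y * w + x) then r + 1 else r) r) 0 := by
  induction h with
  | zero => rw [Nat.zero_mul]; rfl
  | succ h ih =>
    rw [Nat.succ_mul, List.range_add, List.foldl_append, List.foldl_map, ih,
      List.range_succ, List.foldl_append]
    simp only [List.foldl_cons, List.foldl_nil]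

theorem dropTake_extC (md : List Int) (a w : Nat) (hlen : a + w ≤ md.length) :
    (md.drop a).take w = extC md a 1 w := by
  apply List.ext_getElem
  · simp [extC]
    omega
  · intro t h1 h2
    have htw : t < w := by simpa using h2
    have htl : a + t < md.length := by omega
    rw [List.getElem_take, List.getElem_drop]
    simp only [extC, List.getElem_map, List.getElem_range]
    rw [Nat.mul_one, List.getD_eq_getElem md 0 (by omega : a + t < md.length)]

theorem count_pointwise (Mh Mv : List Int) (A B : Nat → Nat → Int) (h w : Nat)
    (hH : ∀ y, y < h → ∀ x, x < w → Mh.getD (y * w + x) 0 = A y x)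
    (hV : ∀ y, y < h → ∀ x, x < w → Mv.getD (y * w + x) 0 = B y x) :
    (List.range (h * w)).foldl
      (fun (r : Int) i => if Mh.getD i 0 = 1 ∨ Mv.getD i 0 = 1 then r + 1 else r) 0
    = (List.range h).foldl (fun (r : Int) y => (List.range w).foldl (fun (r : Int) x =>
        if A y x = 1 ∨ B y x = 1 then r + 1 else r) r) 0 := by
  rw [count_grid (fun i => Mh.getD i 0 = 1 ∨ Mv.getD i 0 = 1) h w]
  apply PySem.List.foldl_congr_mem
  intro acc y hy
  apply PySem.List.foldl_congr_mem
  intro acc2 x hx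
  rw [hH y (List.mem_range.mp hy) x (List.mem_range.mp hx),
    hV y (List.mem_range.mp hy) x (List.mem_range.mp hx)]

theorem a_count (md : List Int) (h w : Nat) (hh1 : 1 ≤ h) (hw1 : 1 ≤ w)
    (hml : h * w ≤ md.length) :
    solve (h : Int) (w : Int) md
    = (List.range h).foldl (fun (r : Int) y => (List.range w).foldl (fun (r : Int) x =>
        if (sweep (extC md (y * w) 1 w)).getD x 0 = 1 ∨ (sweep (extC md x w h)).getD y 0 = 1
        then r + 1 else r) r) 0 := by
  have hmaphR := hphase md h w hw1 hml h 0 (by omega) md rfl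
    (fun y hy => absurd hy (Nat.not_lt_zero y)) (fun j _ _ => rfl)
  simp only [Nat.cast_zero] at hmaphR
  obtain ⟨hMhlen, hMhpos⟩ := hmaphR
  have hmapvR := vphase md h w hh1 hw1 hml w 0 (by omega) (by omega) md rfl
    (fun x hx => absurd hx (Nat.not_lt_zero x)) (fun j _ _ => rfl)
  simp only [Nat.cast_zero] at hmapvR
  obtain ⟨hMvlen, hMvpos⟩ := hmapvR
  simp only [solve]
  rw [show ((w : Int) * (h : Int)) = ((h * w : Nat) : Int) by push_cast; ring]
  rw [PySem.List.pyRange_zero_nat (h * w), List.foldl_map]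
  simp only [PySem.List.pyGetD_natCast]
  exact count_pointwise _ _ _ _ h w hMhpos (fun y hy x hx => hMvpos x hx y hy)

theorem alt_count (md : List Int) (h w : Nat) (hh1 : 1 ≤ h) (hw1 : 1 ≤ w)
    (hml : h * w ≤ md.length) :
    solve_alt (h : Int) (w : Int) md
    = (List.range h).foldl (fun (r : Int) y => (List.range w).foldl (fun (r : Int) x =>
        if ((sweep (extC md (y * w) 1 w)).getD x 0 == 1 || (sweep (extC md x w h)).getD y 0 == 1)
            = true
        then r + 1 else r) r) 0 := by
  simp only [solve_alt]
  rw [if_neg (by push_cast; omega)]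
  simp only [PySem.List.pyRange_zero_nat, List.foldl_map, List.map_map]
  have hslice : ∀ y : Nat, y < h →
      PySem.List.slice md (some ((y : Int) * (w : Int))) (some (((y : Int) + 1) * (w : Int)))
      = extC md (y * w) 1 w := by
    intro y hy
    rw [show ((y : Int) * (w : Int)) = ((y * w : Nat) : Int) by push_cast; ring,
      show (((y : Int) + 1) * (w : Int)) = ((y * w + w : Nat) : Int) by push_cast; ring,
      PySem.List.slice_natCast]
    rw [show y * w + w - y * w = w by omega]
    apply dropTake_extC
    calc y * w + w = (y + 1) * w := by ring
      _ ≤ h * w := Nat.mul_le_mul_right w (by omega)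
      _ ≤ md.length := hml
  have hgetDmap : ∀ (L : List Int) (x : Nat), x < L.length →
      (L.map (fun v => v == 1)).getD x false = (L.getD x 0 == 1) := by
    intro L x hx
    rw [List.getD_eq_getElem _ _ (by simpa using hx), List.getElem_map,
      List.getD_eq_getElem _ _ hx]
  apply PySem.List.foldl_congr_mem
  intro acc y hy
  apply PySem.List.foldl_congr_mem
  intro acc2 x hx
  have hyh : y < h := List.mem_range.mp hy
  have hxw : x < w := List.mem_range.mp hx
  simp only [PySem.List.pyGetD_natCast]
  rw [PySem.List.getD_map_range _ h y [] hyh, PySem.List.getD_map_range _ w x [] hxw]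
  simp only [Function.comp_apply, PySem.List.pyGetD_natCast]
  have hcol : List.map ((fun y : Int =>
      (PySem.List.pyGetD (List.map ((fun y : Int => PySem.List.slice md (some (y * (w : Int)))
          (some ((y + 1) * (w : Int)))) ∘ fun k : Nat => (k : Int)) (List.range h)) y []).getD x 0)
        ∘ fun k : Nat => (k : Int)) (List.range h) = extC md x w h := by
    unfold extC
    apply List.map_congr_left
    intro t ht
    have hth : t < h := List.mem_range.mp ht
    simp only [Function.comp_apply]
    rw [PySem.List.pyGetD_natCast, PySem.List.getD_map_range _ h t [] hth]
    simp only [Function.comp_apply]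
    rw [hslice t hth, extC_getD md _ _ _ x hxw]
    rw [show t * w + x * 1 = x + t * w by omega]
  rw [hslice y hyh, hcol, segLit_eq_sweep, segLit_eq_sweep,
    hgetDmap _ x (by simp; omega), hgetDmap _ y (by simp; omega)]

-- ===== VERDICT (by name: the statement is the Claim_ definition above) =====
theorem solve_spec : Claim_equal_solve := by
  unfold Claim_equal_solve
  intro H W md hdom hpre
  unfold Spec_solve
  rcases hpre with hpre | hdeg
  case inr =>
    have hWH0 : W * H ≤ 0 := by nlinarith
    have hA : solve H W md = 0 := by
      simp only [solve]
      rw [PySem.List.pyRange_one_eq_nil hWH0]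
      rfl
    have hB : solve_alt H W md = 0 := by
      simp only [solve_alt]
      rw [if_pos]
      by_contra hc
      push_neg at hc
      nlinarith [mul_pos hc.1 hc.2]
    rw [hA, hB]
  obtain ⟨hH0, hW0, hml'⟩ := hpre
  obtain ⟨h, rfl⟩ : ∃ n : Nat, H = (n : Int) := ⟨H.toNat, (Int.toNat_of_nonneg hH0).symm⟩
  obtain ⟨w, rfl⟩ : ∃ n : Nat, W = (n : Int) := ⟨W.toNat, (Int.toNat_of_nonneg hW0).symm⟩
  have hml : h * w ≤ md.length := by
    have hc : ((h * w : Nat) : Int) ≤ (md.length : Int) := by push_cast; exact hml'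
    exact_mod_cast hc
  by_cases hz : h = 0 ∨ w = 0
  · have hWH : ((w : Int)) * ((h : Int)) = 0 := by
      rcases hz with hz | hz <;> subst hz <;> simp
    have hA : solve (h : Int) (w : Int) md = 0 := by
      simp only [solve]
      rw [hWH, PySem.List.pyRange_one_eq_nil (le_refl 0)]
      rfl
    have hB : solve_alt (h : Int) (w : Int) md = 0 := by
      simp only [solve_alt]
      rw [if_pos]
      rcases hz with hz | hz <;> subst hz <;> simp
    rw [hA, hB]
  · push_neg at hz
    have hh1 : 1 ≤ h := by have := hz.1; omega
    have hw1 : 1 ≤ w := by have := hz.2; omega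
    rw [a_count md h w hh1 hw1 hml, alt_count md h w hh1 hw1 hml]
    apply PySem.List.foldl_congr_mem
    intro acc y hy
    apply PySem.List.foldl_congr_mem
    intro acc2 x hx
    apply if_congr ?_ rfl rfl
    simp
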